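-- pv_equiv track=rewrite | github.com/Reims796/easy_list | ft_even_ index_list.py | ft_even_index_list
-- ===== SOURCE A (Python) =====
-- def ft_len_mass(mass):
--     a = 0
--     for i in mass:
--         a += 1
--     return a
--
-- def ft_even_index_list(mass):
--     d = ft_len_mass(mass)
--     i = 0
--     x = []
--     for i in range(d):
--         if i % 2 == 0:
--             x.append(mass[i])
--     return x
-- ===== SOURCE B (Python) =====
-- def ft_even_index_list(mass):
--     return list(mass[::2])
-- ===== Notes on version B (the rewrite author's own statement) =====
-- stated objective: idiomatic
-- what changed: Replaces the manual length helper plus index-and-modulo loop with a single extended slice mass[::2] wrapped in list().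
import Mathlib
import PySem

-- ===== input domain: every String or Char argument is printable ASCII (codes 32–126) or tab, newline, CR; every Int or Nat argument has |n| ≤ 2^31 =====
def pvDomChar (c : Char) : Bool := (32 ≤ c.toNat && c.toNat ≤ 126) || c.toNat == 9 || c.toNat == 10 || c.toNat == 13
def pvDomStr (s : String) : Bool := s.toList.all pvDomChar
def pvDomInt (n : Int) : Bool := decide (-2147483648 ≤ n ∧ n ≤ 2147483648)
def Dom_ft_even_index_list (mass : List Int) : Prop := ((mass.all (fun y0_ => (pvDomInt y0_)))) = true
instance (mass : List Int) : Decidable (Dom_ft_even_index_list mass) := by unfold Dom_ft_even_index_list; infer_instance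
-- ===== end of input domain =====

-- B replaces A's manual length helper and index-plus-modulo loop with one extended slice mass[::2] (idiomatic).
-- ===== PORT A =====
def ft_len_mass (mass : List Int) : Int :=
  mass.foldl (fun a _ => a + 1) 0

def ft_even_index_list (mass : List Int) : List Int :=
  let d := ft_len_mass mass
  (PySem.List.pyRange 0 d 1).foldl
    (fun x i => if PySem.Int.mod i 2 == 0 then x ++ [PySem.List.pyGetD mass i 0] else x) []

-- ===== PORT B =====
-- mass[::2] never raises (step ≠ 0), so slice? is always `some`; .getD [] only strips the option.
def ft_even_index_list_alt (mass : List Int) : List Int :=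
  (PySem.List.slice? mass none none 2).getD []

-- ===== PRECONDITION & SPEC =====
def Spec_ft_even_index_list (mass : List Int) (out : List Int) : Prop := out = ft_even_index_list_alt mass
instance (mass : List Int) (out : List Int) : Decidable (Spec_ft_even_index_list mass out) := by unfold Spec_ft_even_index_list; infer_instance

-- ===== CLAIM (what is proved, stated in full; the proofs are below) =====
def Claim_equal_ft_even_index_list : Prop := ∀ (mass : List Int), Dom_ft_even_index_list mass → Spec_ft_even_index_list mass (ft_even_index_list mass)

-- ===== LEMMAS AND PROOFS =====

theorem ft_len_mass_eq (mass : List Int) : ft_len_mass mass = (mass.length : Int) := by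
  suffices h : ∀ (c : Int), mass.foldl (fun a _ => a + 1) c = c + mass.length by
    simpa [ft_len_mass] using h 0
  induction mass with
  | nil => simp
  | cons x t ih => intro c; simp [List.foldl, ih]; ring

theorem filter_even_range (n : Nat) :
    (List.range n).filter (fun k => k % 2 == 0) = (List.range ((n + 1) / 2)).map (fun k => 2 * k) := by
  induction n with
  | zero => simp
  | succ m ih =>
    rcases Nat.even_or_odd m with h | h
    · obtain ⟨j, hj⟩ := h
      have h1 : (m + 1 + 1) / 2 = (m + 1) / 2 + 1 := by omega
      have h2 : (m + 1) / 2 = j := by omega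
      have h3 : m % 2 == 0 := by subst hj; simp; omega
      rw [List.range_succ, List.filter_append, ih, h1, List.range_succ, List.map_append]
      simp [h3, h2]; omega
    · obtain ⟨j, hj⟩ := h
      have h1 : (m + 1 + 1) / 2 = (m + 1) / 2 := by omega
      have h3 : ¬ (m % 2 == 0) := by subst hj; simp
      rw [List.range_succ, List.filter_append, ih, h1]
      simp [h3]

theorem a_side (mass : List Int) :
    ft_even_index_list mass =
      (List.range ((mass.length + 1) / 2)).map (fun k => mass.getD (2 * k) 0) := by
  rw [ft_even_index_list, ft_len_mass_eq, PySem.List.pyRange_one, PySem.List.foldl_append_if]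
  have hn : ((mass.length : Int) - 0).toNat = mass.length := by omega
  rw [hn]
  simp only [List.nil_append, List.filter_map, List.map_map, Function.comp_def, zero_add]
  have hc : (List.range mass.length).filter (fun (k : Nat) => PySem.Int.mod (k : Int) 2 == 0) =
      (List.range mass.length).filter (fun (k : Nat) => k % 2 == 0) := by
    apply List.filter_congr
    intro k _
    simp [PySem.Int.mod, Int.fmod_eq_emod]
    omega
  rw [hc, filter_even_range, List.map_map]
  apply List.map_congr_left
  intro k _
  simp

theorem b_side (mass : List Int) :
    ft_even_index_list_alt mass =
      (List.range ((mass.length + 1) / 2)).map (fun k => mass.getD (2 * k) 0) := by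
  rw [ft_even_index_list_alt, PySem.List.slice?]
  simp only [PySem.List.sliceIndices]
  norm_num
  have hcnt : (if 0 < mass.length then (((mass.length : Int) + 2 - 1) / 2).toNat else 0) =
      (mass.length + 1) / 2 := by split <;> omega
  rw [hcnt]
  rw [List.filterMap_congr (g := fun k => some (mass.getD (2 * k) 0)) ?_]
  · simp
  · intro k hk
    simp only [List.mem_range] at hk
    have h2 : ((2 : Int) * (k : Int)).toNat = 2 * k := by omega
    rw [h2, List.getElem?_eq_getElem (by omega)]
    simp [List.getD_eq_getElem?_getD, List.getElem?_eq_getElem (show 2 * k < mass.length by omega)]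

-- ===== VERDICT (by name: the statement is the Claim_ definition above) =====
theorem ft_even_index_list_spec : Claim_equal_ft_even_index_list := by
  intro mass _
  show ft_even_index_list mass = ft_even_index_list_alt mass
  rw [a_side, b_side]
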